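-- pv_equiv track=rewrite | github.com/MYNTIST-IAM/IAM | scripts/detect_agents.py | find_associated_token
-- ===== SOURCE A (Python) =====
-- def find_associated_token(workflow_name: str, ledger: dict) -> str | None:
--     """
--     Try to find an associated token for this workflow.
--     Logic: Match by workflow name patterns or use a default service account token.
--     Returns token_id or None.
--     """
--     tokens = ledger.get("tokens", [])
--
--     # Try to match workflow name with token owner or usage
--     workflow_lower = workflow_name.lower()
--
--     # Look for service account tokens that might match
--     for token in tokens:
--         owner = token.get("owner", "").lower()
--         usage = token.get("usage", "").lower()
--         entity_type = token.get("entity_type", "")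
--
--         # Match by usage pattern
--         if entity_type == "service_account":
--             if "ci" in workflow_lower and "ci" in usage:
--                 return str(token.get("token_id"))
--             if "deploy" in workflow_lower and "deploy" in usage:
--                 return str(token.get("token_id"))
--             if "auto" in workflow_lower and "auto" in usage:
--                 return str(token.get("token_id"))
--
--     # If no match found, use the first service_account token as default
--     for token in tokens:
--         if token.get("entity_type") == "service_account":
--             return str(token.get("token_id"))
--
--     # Last resort: use first token
--     if tokens:
--         return str(tokens[0].get("token_id"))
--
--     return None
-- ===== SOURCE B (Python) =====
-- def find_associated_token(workflow_name: str, ledger: dict) -> str | None: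
--     tokens = ledger.get("tokens", [])
--     workflow_lower = workflow_name.lower()
--     # keywords that appear in the workflow name (computed once, not per token)
--     keywords = [k for k in ("ci", "deploy", "auto") if k in workflow_lower]
--     first_sa = None
--     first_any = None
--     for token in tokens:
--         if first_any is None:
--             first_any = token
--         if token.get("entity_type") == "service_account":
--             if first_sa is None:
--                 first_sa = token
--             usage = token.get("usage", "").lower()
--             if any(k in usage for k in keywords):
--                 return str(token.get("token_id"))
--     fallback = first_sa if first_sa is not None else first_any
--     return str(fallback.get("token_id")) if fallback is not None else None
-- ===== Notes on version B (the rewrite author's own statement) =====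
-- stated objective: alternative
-- what changed: Replaces A's three sequential scans over tokens (pattern loop, service-account fallback loop, first-token fallback) with one pass that returns on the first pattern match while recording the first service-account token and the first token into write-once accumulators, and hoists the workflow keyword tests out of the loop.
import Mathlib
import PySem

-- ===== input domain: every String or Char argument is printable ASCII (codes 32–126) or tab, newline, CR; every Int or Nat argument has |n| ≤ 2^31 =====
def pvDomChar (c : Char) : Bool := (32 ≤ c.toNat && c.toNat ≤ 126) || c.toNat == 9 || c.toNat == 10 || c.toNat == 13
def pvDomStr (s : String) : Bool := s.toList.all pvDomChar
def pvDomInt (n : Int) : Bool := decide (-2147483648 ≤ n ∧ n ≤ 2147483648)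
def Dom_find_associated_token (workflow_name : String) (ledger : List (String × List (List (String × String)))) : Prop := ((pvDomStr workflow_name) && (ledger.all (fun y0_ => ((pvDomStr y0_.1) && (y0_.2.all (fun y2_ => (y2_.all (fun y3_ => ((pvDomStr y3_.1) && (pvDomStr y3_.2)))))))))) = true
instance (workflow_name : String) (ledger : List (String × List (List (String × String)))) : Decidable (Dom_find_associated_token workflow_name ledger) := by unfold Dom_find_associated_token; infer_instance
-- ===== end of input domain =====

-- B merges A's three sequential scans into a single pass with write-once accumulators; objective: alternative (same cost).

-- dict.get(k) on an association list: first match (shared lookup primitive)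
def dget (d : List (String × String)) (k : String) : Option String :=
  (d.find? (fun p => p.1 == k)).map (·.2)

-- str(token.get("token_id")): str(None) = "None"
def tokStr (t : List (String × String)) : String :=
  match dget t "token_id" with
  | some v => v
  | none => "None"

-- ===== PORT A =====
-- first loop of A: match by usage pattern
def aLoop1 (wl : String) : List (List (String × String)) → Option String
  | [] => none
  | t :: rest =>
    let _owner := PySem.Str.lower ((dget t "owner").getD "")
    let usage := PySem.Str.lower ((dget t "usage").getD "")
    let entity_type := (dget t "entity_type").getD ""
    if entity_type = "service_account" then
      if PySem.Str.isIn "ci" wl && PySem.Str.isIn "ci" usage then some (tokStr t)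
      else if PySem.Str.isIn "deploy" wl && PySem.Str.isIn "deploy" usage then some (tokStr t)
      else if PySem.Str.isIn "auto" wl && PySem.Str.isIn "auto" usage then some (tokStr t)
      else aLoop1 wl rest
    else aLoop1 wl rest

-- second loop of A: first service_account token
def aLoop2 : List (List (String × String)) → Option String
  | [] => none
  | t :: rest =>
    if dget t "entity_type" = some "service_account" then some (tokStr t)
    else aLoop2 rest

def find_associated_token (workflow_name : String) (ledger : List (String × List (List (String × String)))) : Option String :=
  let tokens := ((ledger.find? (fun p => p.1 == "tokens")).map (·.2)).getD []
  let workflow_lower := PySem.Str.lower workflow_name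
  match aLoop1 workflow_lower tokens with
  | some r => some r
  | none =>
    match aLoop2 tokens with
    | some r => some r
    | none =>
      match tokens with
      | [] => none
      | t0 :: _ => some (tokStr t0)

-- ===== PORT B =====
-- single pass: return on first pattern match, record first service-account and first token once
def bLoop (kws : List String) :
    List (List (String × String)) → Option (List (String × String)) → Option (List (String × String)) → Option String
  | [], firstSA, firstAny =>
    match (match firstSA with | some t => some t | none => firstAny) with
    | some t => some (tokStr t)
    | none => none
  | t :: rest, firstSA, firstAny =>
    let firstAny' := match firstAny with | none => some t | some x => some x
    if dget t "entity_type" = some "service_account" then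
      let firstSA' := match firstSA with | none => some t | some x => some x
      let usage := PySem.Str.lower ((dget t "usage").getD "")
      if kws.any (fun k => PySem.Str.isIn k usage) then some (tokStr t)
      else bLoop kws rest firstSA' firstAny'
    else bLoop kws rest firstSA firstAny'

def find_associated_token_alt (workflow_name : String) (ledger : List (String × List (List (String × String)))) : Option String :=
  let tokens := ((ledger.find? (fun p => p.1 == "tokens")).map (·.2)).getD []
  let workflow_lower := PySem.Str.lower workflow_name
  let keywords := ["ci", "deploy", "auto"].filter (fun k => PySem.Str.isIn k workflow_lower)
  bLoop keywords tokens none none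

-- ===== PRECONDITION & SPEC =====
def Spec_find_associated_token (workflow_name : String) (ledger : List (String × List (List (String × String)))) (out : Option String) : Prop := out = find_associated_token_alt workflow_name ledger
instance (workflow_name : String) (ledger : List (String × List (List (String × String)))) (out : Option String) : Decidable (Spec_find_associated_token workflow_name ledger out) := by unfold Spec_find_associated_token; infer_instance

-- ===== CLAIM (what is proved, stated in full; the proofs are below) =====
def Claim_equal_find_associated_token : Prop := ∀ (workflow_name : String) (ledger : List (String × List (List (String × String)))), Dom_find_associated_token workflow_name ledger → Spec_find_associated_token workflow_name ledger (find_associated_token workflow_name ledger)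

-- ===== LEMMAS AND PROOFS =====

-- per-token: B's keyword test (any over the filtered keyword list) equals A's three-way pattern test
lemma cond_eq (wl usage : String) :
    ((["ci", "deploy", "auto"].filter (fun k => PySem.Str.isIn k wl)).any
        (fun k => PySem.Str.isIn k usage))
    = ((PySem.Str.isIn "ci" wl && PySem.Str.isIn "ci" usage)
        || (PySem.Str.isIn "deploy" wl && PySem.Str.isIn "deploy" usage)
        || (PySem.Str.isIn "auto" wl && PySem.Str.isIn "auto" usage)) := by
  cases h1 : PySem.Str.isIn "ci" wl <;> cases h2 : PySem.Str.isIn "deploy" wl <;>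
    cases h3 : PySem.Str.isIn "auto" wl <;>
    simp only [List.filter, h1, h2, h3] <;> simp [List.any, Bool.or_assoc]

-- loop invariant: one pass with accumulators = pattern scan, then recorded/first service-account, then recorded/first token
lemma bLoop_eq (wl : String) (tokens : List (List (String × String)))
    (firstSA firstAny : Option (List (String × String))) :
    bLoop (["ci", "deploy", "auto"].filter (fun k => PySem.Str.isIn k wl)) tokens firstSA firstAny
    = (match aLoop1 wl tokens with
       | some r => some r
       | none =>
         match (match firstSA with | some t => some (tokStr t) | none => aLoop2 tokens) with
         | some r => some r
         | none =>
           match (match firstAny with | some t => some t | none => tokens.head?) with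
           | some t => some (tokStr t)
           | none => none) := by
  induction tokens generalizing firstSA firstAny with
  | nil => cases firstSA <;> cases firstAny <;> rfl
  | cons t rest ih =>
    simp only [bLoop, aLoop1, aLoop2, List.head?]
    by_cases hsa : dget t "entity_type" = some "service_account"
    · have het : ((dget t "entity_type").getD "" = "service_account") := by rw [hsa]; rfl
      rw [if_pos hsa, if_pos het, cond_eq wl]
      set u := PySem.Str.lower ((dget t "usage").getD "") with hu
      by_cases h1 : (PySem.Str.isIn "ci" wl && PySem.Str.isIn "ci" u) = true
      · rw [if_pos (by simp_all), if_pos h1]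
      · by_cases h2 : (PySem.Str.isIn "deploy" wl && PySem.Str.isIn "deploy" u) = true
        · rw [if_pos (by simp_all), if_neg h1, if_pos h2]
        · by_cases h3 : (PySem.Str.isIn "auto" wl && PySem.Str.isIn "auto" u) = true
          · rw [if_pos (by simp_all), if_neg h1, if_neg h2, if_pos h3]
          · rw [if_neg (by simp_all), if_neg h1, if_neg h2, if_neg h3, ih, if_pos hsa]
            cases firstSA <;> cases firstAny <;> rfl
    · rw [if_neg hsa]
      have het : ¬ ((dget t "entity_type").getD "" = "service_account") := by
        intro h
        cases hd : dget t "entity_type" with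
        | none => rw [hd] at h; exact absurd h (by decide)
        | some v => rw [hd] at h; simp at h; exact hsa (by rw [hd, h])
      rw [if_neg het, ih, if_neg hsa]
      cases firstSA <;> cases firstAny <;> rfl

-- ===== VERDICT (by name: the statement is the Claim_ definition above) =====
theorem find_associated_token_spec : Claim_equal_find_associated_token := by
  intro workflow_name ledger _
  unfold Spec_find_associated_token
  simp only [find_associated_token, find_associated_token_alt]
  rw [bLoop_eq]
  generalize ((ledger.find? (fun p => p.1 == "tokens")).map (·.2)).getD [] = tokens
  cases aLoop1 (PySem.Str.lower workflow_name) tokens <;> cases aLoop2 tokens <;>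
    cases tokens <;> rfl
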